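-- pv_equiv track=rewrite | github.com/bhimeshchauhan/Audible | backend/services/character_extractor.py | _build_alias_map
-- ===== SOURCE A (Python) =====
-- from collections import Counter, defaultdict
-- from typing import Any, Dict, List, Set, Tuple
--
-- def _build_alias_map(freq: Counter[str]) -> Dict[str, str]:
--     """Build mapping from short names to full names."""
--     full = [n for n in freq if len(n.split()) >= 2]
--     by_last: Dict[str, List[str]] = defaultdict(list)
--     for fn in full:
--         by_last[fn.split()[-1]].append(fn)
--     alias: Dict[str, str] = {}
--     for last, cands in by_last.items():
--         cands = sorted(cands, key=lambda x: freq[x], reverse=True)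
--         if not cands:
--             continue
--         top = cands[0]
--         second = cands[1] if len(cands) > 1 else None
--         if second is None or freq[top] >= 2 * max(1, freq[second]):
--             alias[last] = top
--     return alias
-- ===== SOURCE B (Python) =====
-- from collections import Counter
-- from typing import Dict, Optional, Tuple
--
--
-- def _build_alias_map(freq: Counter) -> Dict[str, str]:
--     """Build mapping from short names to full names (one pass:
--     per last name keep the stable-best name and the second-best frequency)."""
--     best: Dict[str, Tuple[str, int, Optional[int]]] = {}
--     for name, f in freq.items():
--         parts = name.split()
--         if len(parts) < 2:
--             continue
--         last = parts[-1]
--         e = best.get(last)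
--         if e is None:
--             best[last] = (name, f, None)
--         elif f > e[1]:
--             best[last] = (name, f, e[1])
--         elif e[2] is None or f > e[2]:
--             best[last] = (e[0], e[1], f)
--     return {last: top for last, (top, topf, secf) in best.items()
--             if secf is None or topf >= 2 * max(1, secf)}
-- ===== Notes on version B (the rewrite author's own statement) =====
-- stated objective: alternative
-- what changed: Per last-name group A builds candidate lists, sorts each by frequency and reads the top two; B instead makes one pass over the dict items keeping, per last name, only the stably-first highest-frequency name and the second-highest frequency (top-2 selection, no sort and no intermediate grouping lists).
import Mathlib
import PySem

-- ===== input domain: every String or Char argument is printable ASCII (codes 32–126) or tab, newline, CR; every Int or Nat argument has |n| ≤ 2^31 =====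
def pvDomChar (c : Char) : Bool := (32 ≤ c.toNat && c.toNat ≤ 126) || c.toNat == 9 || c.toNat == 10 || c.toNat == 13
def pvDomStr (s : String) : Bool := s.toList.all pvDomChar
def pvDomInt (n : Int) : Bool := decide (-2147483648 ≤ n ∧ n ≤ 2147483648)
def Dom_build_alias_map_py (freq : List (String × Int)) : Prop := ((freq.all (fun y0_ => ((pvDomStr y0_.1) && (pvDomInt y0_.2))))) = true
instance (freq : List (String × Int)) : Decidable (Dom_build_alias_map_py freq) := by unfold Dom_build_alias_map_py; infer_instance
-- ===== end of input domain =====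

-- B replaces A's per-last-name full sort by a single linear pass that keeps, per last
-- name, the stably-first most-frequent full name and the second-highest frequency.

-- ===== PORT A =====
def build_alias_map_py (freq : List (String × Int)) : List (String × String) :=
  let fd := PySem.Dict.ofList freq
  -- full = [n for n in freq if len(n.split()) >= 2]
  let full := fd.keys.filter (fun n => 2 ≤ (PySem.Str.split₀ n).length)
  -- for fn in full: by_last[fn.split()[-1]].append(fn)
  let by_last := full.foldl (fun (d : PySem.Dict String (List String)) fn =>
      match PySem.List.pyGet? (PySem.Str.split₀ fn) (-1) with
      | some l => d.modify l [] (fun cs => cs ++ [fn])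
      | none => d) PySem.Dict.empty    -- none branch unreachable (len >= 2): totality guard
  -- for last, cands in by_last.items(): ...
  let amap := by_last.items.foldl (fun (a : PySem.Dict String String) p =>
      let cands := PySem.List.sorted p.2 (fun x => fd.getD x 0) true
      match cands with
      | [] => a                        -- 'if not cands: continue'
      | top :: _ =>
          let second := if 1 < cands.length then PySem.List.pyGet? cands 1 else none
          match second with
          | none => a.insert p.1 top
          | some s =>
              if 2 * max 1 (fd.getD s 0) ≤ fd.getD top 0 then a.insert p.1 top else a)
    PySem.Dict.empty
  amap.items

-- ===== PORT B =====
def build_alias_map_py_alt (freq : List (String × Int)) : List (String × String) :=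
  let fd := PySem.Dict.ofList freq
  let best := fd.items.foldl (fun (b : PySem.Dict String (String × Int × Option Int)) p =>
      let parts := PySem.Str.split₀ p.1
      if parts.length < 2 then b
      else
        -- parts[-1]: parts has >= 2 elements here, so getLast? is some — exact
        let last := (parts.getLast?).getD ""
        match b.get? last with
        | none => b.insert last (p.1, p.2, none)
        | some e =>
            if e.2.1 < p.2 then b.insert last (p.1, p.2, some e.2.1)
            else match e.2.2 with
              | none => b.insert last (e.1, e.2.1, some p.2)
              | some s => if s < p.2 then b.insert last (e.1, e.2.1, some p.2) else b)
    PySem.Dict.empty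
  (best.items.filter (fun q => match q.2.2.2 with
      | none => true
      | some s => decide (2 * max 1 s ≤ q.2.2.1))).map (fun q => (q.1, q.2.1))

-- ===== PRECONDITION & SPEC =====
def Spec_build_alias_map_py (freq : List (String × Int)) (out : List (String × String)) : Prop := out = build_alias_map_py_alt freq
instance (freq : List (String × Int)) (out : List (String × String)) : Decidable (Spec_build_alias_map_py freq out) := by unfold Spec_build_alias_map_py; infer_instance

-- ===== CLAIM (what is proved, stated in full; the proofs are below) =====
def Claim_equal_build_alias_map_py : Prop := ∀ (freq : List (String × Int)), Dom_build_alias_map_py freq → Spec_build_alias_map_py freq (build_alias_map_py freq)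

-- ===== LEMMAS AND PROOFS =====
def lastW (n : String) : String := ((PySem.Str.split₀ n).getLast?).getD ""

def tw2 (g : String → Int) (acc : Option (String × Int × Option Int)) (n : String) :
    Option (String × Int × Option Int) :=
  match acc with
  | none => some (n, g n, none)
  | some (t, tf, sf) =>
      if tf < g n then some (n, g n, some tf)
      else match sf with
        | none => some (t, tf, some (g n))
        | some s => if s < g n then some (t, tf, some (g n)) else some (t, tf, some s)

def stepB (b : PySem.Dict String (String × Int × Option Int)) (p : String × Int) :
    PySem.Dict String (String × Int × Option Int) :=
  let parts := PySem.Str.split₀ p.1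
  if parts.length < 2 then b
  else
    let last := (parts.getLast?).getD ""
    match b.get? last with
    | none => b.insert last (p.1, p.2, none)
    | some e =>
        if e.2.1 < p.2 then b.insert last (p.1, p.2, some e.2.1)
        else match e.2.2 with
          | none => b.insert last (e.1, e.2.1, some p.2)
          | some s => if s < p.2 then b.insert last (e.1, e.2.1, some p.2) else b

theorem stepB_get (g : String → Int) (b : PySem.Dict String (String × Int × Option Int))
    (p : String × Int) (hgp : g p.1 = p.2) (l' : String) :
    (stepB b p).get? l' =
      if 2 ≤ (PySem.Str.split₀ p.1).length then
        (if lastW p.1 == l' then tw2 g (b.get? (lastW p.1)) p.1 else b.get? l')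
      else b.get? l' := by
  unfold stepB
  by_cases hlen : (PySem.Str.split₀ p.1).length < 2
  · rw [if_pos hlen, if_neg (show ¬ (2 ≤ (PySem.Str.split₀ p.1).length) by omega)]
  · rw [if_neg hlen, if_pos (by omega)]
    have hlw : ((PySem.Str.split₀ p.1).getLast?).getD "" = lastW p.1 := rfl
    rw [hlw]
    by_cases hll : lastW p.1 = l'
    · subst hll
      simp only [beq_self_eq_true, if_pos]
      cases hb : b.get? (lastW p.1) with
      | none => simp [tw2, hgp]
      | some e =>
          obtain ⟨t, tf, sf⟩ := e
          by_cases h1 : tf < p.2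
          · simp [tw2, h1, hgp]
          · cases sf with
            | none => simp [tw2, h1, hgp]
            | some s =>
                by_cases h2 : s < p.2
                · simp [tw2, h1, h2, hgp]
                · simp [tw2, h1, h2, hgp, hb]
    · have hbeq : (lastW p.1 == l') = false := by simp [hll]
      rw [hbeq]; simp only [Bool.false_eq_true, if_false]
      cases hb : b.get? (lastW p.1) with
      | none => simp [PySem.Dict.get?_insert, Ne.symm hll]
      | some e =>
          obtain ⟨t, tf, sf⟩ := e
          by_cases h1 : tf < p.2
          · simp [PySem.Dict.get?_insert, h1, Ne.symm hll]
          · cases sf with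
            | none => simp [PySem.Dict.get?_insert, h1, Ne.symm hll]
            | some s =>
                by_cases h2 : s < p.2 <;> simp [PySem.Dict.get?_insert, h1, h2, Ne.symm hll]

theorem dict_contains_keys {ν : Type} (b : PySem.Dict String ν) (k : String) :
    b.contains k = b.keys.contains k := by
  rw [PySem.Dict.contains_eq_decide_mem_keys, List.contains_eq_mem]

theorem stepB_keys (b : PySem.Dict String (String × Int × Option Int)) (p : String × Int) :
    (stepB b p).keys =
      if 2 ≤ (PySem.Str.split₀ p.1).length then PySem.Set.add b.keys (lastW p.1) else b.keys := by
  unfold stepB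
  by_cases hlen : (PySem.Str.split₀ p.1).length < 2
  · rw [if_pos hlen, if_neg (show ¬ (2 ≤ (PySem.Str.split₀ p.1).length) by omega)]
  · rw [if_neg hlen, if_pos (by omega)]
    have hlw : ((PySem.Str.split₀ p.1).getLast?).getD "" = lastW p.1 := rfl
    rw [hlw]
    cases hb : b.get? (lastW p.1) with
    | none =>
        have hc : b.contains (lastW p.1) = false := (PySem.Dict.get?_eq_none_iff_contains b _).mp hb
        simp only [hb]
        rw [PySem.Dict.keys_insert_of_not_contains _ _ hc]
        have h2 : lastW p.1 ∉ b.keys := by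
          have := dict_contains_keys b (lastW p.1)
          rw [hc, eq_comm, List.contains_eq_mem] at this
          simpa using this
        simp [PySem.Set.add, PySem.Set.contains, List.contains_eq_mem, h2]
    | some e =>
        have hc : b.contains (lastW p.1) = true := by
          rcases h : b.contains (lastW p.1) with _ | _
          · rw [(PySem.Dict.get?_eq_none_iff_contains b _).mpr h] at hb; cases hb
          · rfl
        have hadd : PySem.Set.add b.keys (lastW p.1) = b.keys := by
          have h2 : lastW p.1 ∈ b.keys := by
            have := dict_contains_keys b (lastW p.1)
            rw [hc, eq_comm, List.contains_eq_mem] at this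
            simpa using this
          simp [PySem.Set.add, PySem.Set.contains, List.contains_eq_mem, h2]
        simp only [hb]
        obtain ⟨t, tf, sf⟩ := e
        by_cases h1 : tf < p.2
        · simp [h1, PySem.Dict.keys_insert_of_contains _ _ hc, hadd]
        · cases sf with
          | none => simp [h1, PySem.Dict.keys_insert_of_contains _ _ hc, hadd]
          | some s =>
              by_cases h2 : s < p.2 <;>
                simp [h1, h2, PySem.Dict.keys_insert_of_contains _ _ hc, hadd]

theorem bestB_get (g : String → Int) (L : List (String × Int)) (b : PySem.Dict String (String × Int × Option Int))
    (hL : ∀ p ∈ L, g p.1 = p.2) (l' : String) :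
    (L.foldl stepB b).get? l' =
      (L.filter (fun p => decide (2 ≤ (PySem.Str.split₀ p.1).length) && (lastW p.1 == l'))).foldl
        (fun acc p => tw2 g acc p.1) (b.get? l') := by
  induction L generalizing b with
  | nil => rfl
  | cons p L ih =>
      simp only [List.foldl_cons, List.filter_cons]
      rw [ih _ (fun q hq => hL q (List.mem_cons_of_mem p hq))]
      rw [stepB_get g b p (hL p (List.mem_cons_self ..)) l']
      by_cases hlen : 2 ≤ (PySem.Str.split₀ p.1).length
      · by_cases hlast : lastW p.1 = l'
        · rw [if_pos hlen]
          subst hlast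
          simp [hlen]
        · have : (lastW p.1 == l') = false := by simp [hlast]
          rw [if_pos hlen, this]
          simp [hlen]
      · rw [if_neg hlen]
        simp [hlen]

theorem bestB_keys (L : List (String × Int)) (b : PySem.Dict String (String × Int × Option Int)) :
    (L.foldl stepB b).keys =
      ((L.filter (fun p => decide (2 ≤ (PySem.Str.split₀ p.1).length))).map (fun p => lastW p.1)).foldl
        PySem.Set.add b.keys := by
  induction L generalizing b with
  | nil => rfl
  | cons p L ih =>
      simp only [List.foldl_cons, List.filter_cons]
      rw [ih]
      rw [stepB_keys b p]
      by_cases hlen : 2 ≤ (PySem.Str.split₀ p.1).length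
      · simp [hlen]
      · simp [hlen]

def cc2 (e : Option (String × Int × Option Int)) : Bool :=
  match e with
  | none => false
  | some (_, tf, sf) =>
      match sf with
      | none => true
      | some s => decide (2 * max 1 s ≤ tf)

def tt2 (e : Option (String × Int × Option Int)) : String :=
  match e with
  | none => ""
  | some (t, _, _) => t

def stepA (g : String → Int) (a : PySem.Dict String String) (p : String × List String) :
    PySem.Dict String String :=
  let cands := PySem.List.sorted p.2 g true
  match cands with
  | [] => a
  | top :: _ =>
      let second := if 1 < cands.length then PySem.List.pyGet? cands 1 else none
      match second with
      | none => a.insert p.1 top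
      | some s => if 2 * max 1 (g s) ≤ g top then a.insert p.1 top else a

def relTS' (g : String → Int) (ss : List String) (acc : Option (String × Int × Option Int)) : Prop :=
  match acc with
  | none => ss = []
  | some (t, tf, sf) => ss.head? = some t ∧ tf = g t ∧ ss.tail.head?.map g = sf

theorem pyGet_one' {α : Type} (a b : α) (r : List α) :
    PySem.List.pyGet? (a :: b :: r) 1 = some b := by
  simp [PySem.List.pyGet?, PySem.List.pyIdx?]

theorem relTS'_step (g : String → Int) (ss : List String) (acc : Option (String × Int × Option Int))
    (h : relTS' g ss acc) (x : String) :
    relTS' g (PySem.List.insertBy (fun a b => decide (g b < g a)) x ss) (tw2 g acc x) := by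
  match acc with
  | none =>
      simp only [relTS'] at h; subst h
      simp [relTS', tw2, PySem.List.insertBy]
  | some (t, tf, sf) =>
      obtain ⟨h1, h2, h3⟩ := h
      match ss, h1 with
      | t :: rest, rfl =>
        subst h2
        match rest, sf, h3 with
        | [], none, _ =>
            by_cases hx : g t < g x
            · simp [relTS', tw2, PySem.List.insertBy, hx]
            · simp [relTS', tw2, PySem.List.insertBy, hx]
        | s :: r, some sv, h3 =>
            simp only [List.tail_cons, List.head?_cons, Option.map_some, Option.some.injEq] at h3
            subst h3
            by_cases hx : g t < g x
            · simp [relTS', tw2, PySem.List.insertBy, hx]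
            · by_cases hs : g s < g x <;>
                simp [relTS', tw2, PySem.List.insertBy, hx, hs]

theorem relTS'_foldl (g : String → Int) (cands : List String) (ss : List String)
    (acc : Option (String × Int × Option Int)) (h : relTS' g ss acc) :
    relTS' g (cands.foldl (fun acc x => PySem.List.insertBy (fun a b => decide (g b < g a)) x acc) ss)
      (cands.foldl (tw2 g) acc) := by
  induction cands generalizing ss acc with
  | nil => exact h
  | cons c cs ih => exact ih _ _ (relTS'_step g ss acc h c)

theorem relTS'_sorted (g : String → Int) (cands : List String) :
    relTS' g (PySem.List.sorted cands g true) (cands.foldl (tw2 g) none) := by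
  rw [PySem.List.sorted_rev_eq_foldl_insertBy]
  exact relTS'_foldl g cands [] none rfl

theorem stepA_char (g : String → Int) (a : PySem.Dict String String) (l : String)
    (cands : List String) (hne : cands ≠ []) :
    stepA g a (l, cands) =
      if cc2 (cands.foldl (tw2 g) none) then a.insert l (tt2 (cands.foldl (tw2 g) none)) else a := by
  have hrel := relTS'_sorted g cands
  unfold stepA
  cases hacc : cands.foldl (tw2 g) none with
  | none =>
      rw [hacc] at hrel
      simp only [relTS'] at hrel
      exact absurd ((PySem.List.sorted_eq_nil_iff cands g true).mp hrel) hne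
  | some e =>
      obtain ⟨t, tf, sf⟩ := e
      rw [hacc] at hrel
      obtain ⟨h1, h2, h3⟩ := hrel
      cases hs : PySem.List.sorted cands g true with
      | nil => exact absurd ((PySem.List.sorted_eq_nil_iff cands g true).mp hs) hne
      | cons top rest =>
          rw [hs] at h1 h3
          simp only [List.head?_cons, Option.some.injEq] at h1
          subst h1; subst h2
          cases rest with
          | nil =>
              simp only [List.tail_cons, List.head?_nil, Option.map_none] at h3
              subst h3
              simp [cc2, tt2]
          | cons s r =>
              simp only [List.tail_cons, List.head?_cons, Option.map_some] at h3
              subst h3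
              have hlen : 1 < (top :: s :: r).length := by simp
              simp only [hlen, if_pos, pyGet_one']
              simp [cc2, tt2]

theorem filterMap_ite {α β : Type} (xs : List α) (c : α → Bool) (h : α → β) :
    xs.filterMap (fun x => if c x then some (h x) else none) = (xs.filter c).map h := by
  induction xs with
  | nil => rfl
  | cons x xs ih =>
      simp only [List.filterMap_cons, List.filter_cons]
      by_cases hc : c x = true
      · simp [hc, ih]
      · simp [hc, ih]

theorem tw2_isSome (g : String → Int) (acc : Option (String × Int × Option Int)) (n : String) :
    (tw2 g acc n).isSome := by
  match acc with
  | none => rfl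
  | some (t, tf, sf) =>
      by_cases h1 : tf < g n
      · simp [tw2, h1]
      · cases sf with
        | none => simp [tw2, h1]
        | some s => by_cases h2 : s < g n <;> simp [tw2, h1, h2]

theorem foldl_tw2_isSome (g : String → Int) (cs : List String)
    (acc : Option (String × Int × Option Int)) (h : acc.isSome ∨ cs ≠ []) :
    (cs.foldl (tw2 g) acc).isSome := by
  induction cs generalizing acc with
  | nil => simpa using h.resolve_right (by simp)
  | cons c cs ih => exact ih (tw2 g acc c) (Or.inl (tw2_isSome g acc c))

theorem items_foldl_cond_insert' {K V R : Type} [BEq K] [LawfulBEq K]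
    (ps : List (K × V)) (c : K × V → Bool) (t : K × V → R) (a : PySem.Dict K R)
    (h1 : (ps.map Prod.fst).Nodup) (h2 : ∀ p ∈ ps, a.contains p.1 = false) :
    (ps.foldl (fun a p => if c p then a.insert p.1 (t p) else a) a).items
      = a.items ++ ps.filterMap (fun p => if c p then some (p.1, t p) else none) := by
  induction ps generalizing a with
  | nil => simp
  | cons p ps ih =>
      simp only [List.map_cons, List.nodup_cons, List.mem_map] at h1
      obtain ⟨hp, hnd2⟩ := h1
      have hfresh : ∀ q ∈ ps, q.1 ≠ p.1 := by
        intro q hq heq; exact hp ⟨q, hq, heq⟩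
      simp only [List.foldl_cons, List.filterMap_cons]
      by_cases hc : c p = true
      · rw [if_pos hc, if_pos hc]
        rw [ih _ hnd2 (by
          intro q hq
          rw [PySem.Dict.contains_insert]
          simp [hfresh q hq, h2 q (List.mem_cons_of_mem p hq)])]
        rw [PySem.Dict.items_insert_of_not_contains _ _ (h2 p (List.mem_cons_self ..))]
        simp
      · rw [if_neg hc, if_neg hc]
        exact ih _ hnd2 (fun q hq => h2 q (List.mem_cons_of_mem p hq))

theorem pyGet_neg_one {α : Type} (xs : List α) (h : xs ≠ []) (d : α) :
    PySem.List.pyGet? xs (-1) = some (xs.getLast?.getD d) := by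
  have hl : 0 < xs.length := List.length_pos_iff.mpr h
  simp only [PySem.List.pyGet?, PySem.List.pyIdx?]
  rw [if_neg (by omega), if_pos (by omega)]
  rw [show (-(-1:Int)).toNat = 1 by rfl]
  simp only [Option.bind]
  rw [List.getElem?_eq_getElem (by omega)]
  rw [List.getLast?_eq_some_getLast h]
  simp [List.getLast_eq_getElem]

theorem main_eq (L : List (String × Int)) (g : String → Int)
    (hL : ∀ p ∈ L, g p.1 = p.2) :
    ((((L.map Prod.fst).filter (fun n => 2 ≤ (PySem.Str.split₀ n).length)).foldl
        (fun (d : PySem.Dict String (List String)) fn =>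
          match PySem.List.pyGet? (PySem.Str.split₀ fn) (-1) with
          | some l => d.modify l [] (fun cs => cs ++ [fn])
          | none => d) PySem.Dict.empty).items.foldl (stepA g) PySem.Dict.empty).items
    = ((L.foldl stepB PySem.Dict.empty).items.filter (fun q => match q.2.2.2 with
          | none => true
          | some s => decide (2 * max 1 s ≤ q.2.2.1))).map (fun q => (q.1, q.2.1)) := by
  set full := (L.map Prod.fst).filter (fun n => decide (2 ≤ (PySem.Str.split₀ n).length)) with hfull
  have hfullmem : ∀ fn ∈ full, PySem.Str.split₀ fn ≠ [] := by
    intro fn hfn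
    have h := (List.mem_filter.mp hfn).2
    simp only [decide_eq_true_eq] at h
    intro hnil; rw [hnil] at h; simp at h
  have h1 : full.foldl
      (fun (d : PySem.Dict String (List String)) fn =>
        match PySem.List.pyGet? (PySem.Str.split₀ fn) (-1) with
        | some l => d.modify l [] (fun cs => cs ++ [fn])
        | none => d) PySem.Dict.empty
      = full.foldl (fun d fn => d.modify (lastW fn) [] (fun cs => cs ++ [fn])) PySem.Dict.empty := by
    apply PySem.List.foldl_congr_mem
    intro d fn hfn
    rw [pyGet_neg_one _ (hfullmem fn hfn) ""]
    rfl
  rw [h1]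
  set byl := full.foldl (fun d fn => d.modify (lastW fn) [] (fun cs => cs ++ [fn])) PySem.Dict.empty with hbyl
  have hkeys : byl.keys = PySem.Set.ofList (full.map lastW) := by
    rw [hbyl, PySem.Dict.keys_foldl_modify_key full lastW ([] : List String) (fun _ fn => fun cs => cs ++ [fn]) PySem.Dict.empty]
    simp [PySem.Set.update, ← PySem.Set.ofList_eq_foldl]
  have hnodup : byl.keys.Nodup := by rw [hkeys]; exact PySem.Set.nodup_ofList _
  have hgetD : ∀ l, byl.getD l [] = full.filter (fun fn => lastW fn == l) := by
    intro l
    rw [hbyl]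
    rw [show (full.foldl (fun d fn => d.modify (lastW fn) [] (fun cs => cs ++ [fn])) PySem.Dict.empty)
        = ((full.map (fun fn => (lastW fn, fn))).foldl (fun d p => d.modify p.1 [] (fun cs => cs ++ [p.2])) PySem.Dict.empty) from
        (List.foldl_map (f := fun fn => (lastW fn, fn)) (g := fun (d : PySem.Dict String (List String)) p => d.modify p.1 [] (fun cs => cs ++ [p.2])) (l := full) (init := PySem.Dict.empty)).symm]
    rw [PySem.Dict.getD_foldl_modify_append]
    simp [List.filter_map, List.map_map, Function.comp_def]
  set lasts := PySem.Set.ofList (full.map lastW) with hlasts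
  set grp : String → List String := fun l => full.filter (fun fn => lastW fn == l) with hgrp
  have hitems : byl.items = lasts.map (fun l => (l, grp l)) := by
    rw [PySem.Dict.items_eq_map_keys byl hnodup [], hkeys]
    exact List.map_congr_left (fun l hl => by rw [hgetD l])
  have hgrpne : ∀ l ∈ lasts, grp l ≠ [] := by
    intro l hl
    rw [hlasts, PySem.Set.mem_ofList] at hl
    obtain ⟨fn, hfn, rfl⟩ := List.mem_map.mp hl
    intro hnil
    have hmem : fn ∈ grp (lastW fn) := List.mem_filter.mpr ⟨hfn, by simp⟩
    rw [hnil] at hmem; cases hmem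
  rw [hitems]
  have h2 : (lasts.map (fun l => (l, grp l))).foldl (stepA g) PySem.Dict.empty
      = (lasts.map (fun l => (l, grp l))).foldl
          (fun a p => if cc2 (p.2.foldl (tw2 g) none) then a.insert p.1 (tt2 (p.2.foldl (tw2 g) none)) else a)
          PySem.Dict.empty := by
    apply PySem.List.foldl_congr_mem
    intro a p hp
    obtain ⟨l, hl, rfl⟩ := List.mem_map.mp hp
    exact stepA_char g a l (grp l) (hgrpne l hl)
  rw [h2]
  rw [items_foldl_cond_insert' (lasts.map (fun l => (l, grp l))) _ _ PySem.Dict.empty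
    (by simp only [List.map_map]
        have : ((fun p => p.1) ∘ fun l => (l, grp l)) = id := rfl
        rw [this, List.map_id]
        exact PySem.Set.nodup_ofList _)
    (fun p _ => PySem.Dict.contains_empty p.1)]
  rw [List.filterMap_map]
  have hempty_items : (PySem.Dict.empty : PySem.Dict String String).items = [] := rfl
  rw [hempty_items, List.nil_append]
  rw [show ((fun (p : String × List String) => if cc2 (p.2.foldl (tw2 g) none) then some (p.1, tt2 (p.2.foldl (tw2 g) none)) else none) ∘ fun l => (l, grp l))
      = fun l => if cc2 ((grp l).foldl (tw2 g) none) then some (l, tt2 ((grp l).foldl (tw2 g) none)) else none from rfl]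
  rw [filterMap_ite lasts (fun l => cc2 ((grp l).foldl (tw2 g) none)) (fun l => (l, tt2 ((grp l).foldl (tw2 g) none)))]
  -- ===== B side =====
  have hbk : (L.foldl stepB PySem.Dict.empty).keys = lasts := by
    rw [bestB_keys]
    have hek : (PySem.Dict.empty : PySem.Dict String (String × Int × Option Int)).keys = [] := rfl
    rw [hek, ← PySem.Set.ofList_eq_foldl, hlasts]
    congr 1
    rw [hfull, List.filter_map, List.map_map]
    rfl
  have hbnodup : (L.foldl stepB PySem.Dict.empty).keys.Nodup := by
    rw [hbk]; exact PySem.Set.nodup_ofList _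
  have hbget : ∀ l, (L.foldl stepB PySem.Dict.empty).get? l = (grp l).foldl (tw2 g) none := by
    intro l
    rw [bestB_get g L PySem.Dict.empty hL l]
    have he : (PySem.Dict.empty : PySem.Dict String (String × Int × Option Int)).get? l = none := rfl
    rw [he]
    rw [show ((L.filter (fun p => decide (2 ≤ (PySem.Str.split₀ p.1).length) && (lastW p.1 == l))).foldl (fun acc p => tw2 g acc p.1) none)
        = (((L.filter (fun p => decide (2 ≤ (PySem.Str.split₀ p.1).length) && (lastW p.1 == l))).map Prod.fst).foldl (tw2 g) none) from
        (List.foldl_map (f := Prod.fst) (g := tw2 g)).symm]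
    congr 1
    simp only [hgrp, hfull]
    conv_rhs => rw [List.filter_filter, List.filter_map]
    refine congrArg (List.map Prod.fst) (List.filter_congr (fun p _ => ?_))
    simp only [Function.comp_apply]
    exact Bool.and_comm _ _
  have hbitems : (L.foldl stepB PySem.Dict.empty).items
      = lasts.map (fun l => (l, ((grp l).foldl (tw2 g) none).getD ("", 0, none))) := by
    rw [PySem.Dict.items_eq_map_keys _ hbnodup ("", 0, none), hbk]
    exact List.map_congr_left (fun l hl => by rw [PySem.Dict.getD_eq_get?_getD, hbget l])
  rw [hbitems]
  rw [List.filter_map, List.map_map]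
  -- ===== pointwise comparison over lasts =====
  have hsome : ∀ l ∈ lasts, ∃ e, (grp l).foldl (tw2 g) none = some e := by
    intro l hl
    have := foldl_tw2_isSome g (grp l) none (Or.inr (hgrpne l hl))
    exact Option.isSome_iff_exists.mp this
  have hcf : ∀ l ∈ lasts, (fun l => cc2 ((grp l).foldl (tw2 g) none)) l
      = ((fun q : String × String × Int × Option Int => match q.2.2.2 with
          | none => true
          | some s => decide (2 * max 1 s ≤ q.2.2.1)) ∘ fun l => (l, ((grp l).foldl (tw2 g) none).getD ("", 0, none))) l := by
    intro l hl
    obtain ⟨⟨t, tf, sf⟩, he⟩ := hsome l hl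
    simp only [Function.comp_apply, he, Option.getD_some]
    cases sf <;> simp [cc2]
  rw [List.filter_congr hcf]
  apply List.map_congr_left
  intro l hl
  have hl' : l ∈ lasts := List.mem_of_mem_filter hl
  obtain ⟨⟨t, tf, sf⟩, he⟩ := hsome l hl'
  simp only [Function.comp_apply, he, Option.getD_some]
  simp [tt2]

-- ===== VERDICT (by name: the statement is the Claim_ definition above) =====
theorem build_alias_map_py_spec : Claim_equal_build_alias_map_py := by
  intro freq _
  unfold Spec_build_alias_map_py
  have hnd : (PySem.Dict.ofList freq).keys.Nodup := PySem.Dict.nodup_keys_ofList freq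
  have hL : ∀ p ∈ (PySem.Dict.ofList freq).items, (fun n => (PySem.Dict.ofList freq).getD n 0) p.1 = p.2 := by
    intro p hp
    obtain ⟨k, v⟩ := p
    exact PySem.Dict.getD_of_mem_items _ hp hnd 0
  exact main_eq (PySem.Dict.ofList freq).items (fun n => (PySem.Dict.ofList freq).getD n 0) hL
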